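-- pv_equiv track=rewrite | github.com/hidaruma/caty | python/lib/creole/creole/syntax/base.py | escape_tilda
-- ===== SOURCE A (Python) =====
-- def escape_tilda(t):
--     if t == '~':
--         return u''
--     seq = list(_exact_split(t))
--     r = ['dummy']
--     for s in seq:
--         if not s and not r[-1]:
--             r.append(u'~')
--         else:
--             r.append(s)
--     return u''.join(r[1:])
--
-- def _exact_split(t):
--     chunk = []
--     p = 0
--     not_line_top = False
--     pchar = ''
--     for n, c in enumerate(t):
--         if c == '~':
--             yield t[p:n]
--             if not_line_top and pchar=='~':
--                 yield u''
--             p = n+1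
--         else:
--             not_line_top= True
--         pchar = c
--     yield t[p:]
-- ===== SOURCE B (Python) =====
-- def escape_tilda(t):
--     # single forward pass over maximal tilde runs; no chunk list, no sentinel
--     if t == '~':
--         return u''
--     out = []
--     i, n = 0, len(t)
--     while i < n:
--         c = t[i]
--         if c != '~':
--             out.append(c)
--             i += 1
--         else:
--             j = i
--             while j < n and t[j] == '~':
--                 j += 1
--             run = j - i
--             if i == 0:
--                 k = (run + 1) // 2 if j == n else run // 2
--             else:
--                 k = run - 1
--             out.append(u'~' * k)
--             i = j
--     return u''.join(out)
-- ===== Notes on version B (the rewrite author's own statement) =====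
-- stated objective: simpler
-- what changed: Replaces the generator-based chunk splitting plus sentinel-seeded lookback fold with one direct pass over maximal tilde runs that emits each run's contribution (run-1 tildes inside the text, a halved count for a leading run) and copies other characters verbatim.
import Mathlib
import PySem

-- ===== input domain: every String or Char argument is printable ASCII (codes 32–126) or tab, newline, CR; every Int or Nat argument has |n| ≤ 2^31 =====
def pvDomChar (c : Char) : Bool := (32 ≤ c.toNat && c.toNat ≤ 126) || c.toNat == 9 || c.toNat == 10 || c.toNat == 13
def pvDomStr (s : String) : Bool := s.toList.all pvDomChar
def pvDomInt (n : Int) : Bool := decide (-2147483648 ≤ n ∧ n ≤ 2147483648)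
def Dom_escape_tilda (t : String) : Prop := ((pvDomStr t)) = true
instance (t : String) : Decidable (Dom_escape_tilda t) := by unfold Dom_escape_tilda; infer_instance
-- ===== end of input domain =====

-- B replaces A's generator-split + sentinel-lookback fold by one direct pass over maximal
-- tilde runs (objective: simpler). A is total; equivalence on all strings.

-- ===== PORT A =====
-- one step of the loop body of _exact_split: state (yields so far, p, not_line_top, pchar)
def etSplitStep (t : List Char) (st : List (List Char) × Int × Bool × List Char)
    (nc : Int × Char) : List (List Char) × Int × Bool × List Char :=
  let (ys, p, ntl, pchar) := st
  let (n, c) := nc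
  if c = '~' then
    let ys1 := ys ++ [PySem.List.slice t (some p) (some n)]
    let ys2 := if ntl && pchar == ['~'] then ys1 ++ [[]] else ys1
    (ys2, n + 1, ntl, [c])
  else
    (ys, p, true, [c])

-- _exact_split(t): the generator, its yields collected in order (strings as List Char)
def exactSplitA (t : List Char) : List (List Char) :=
  let st := (PySem.List.enumerate t 0).foldl (etSplitStep t) ([], 0, false, [])
  st.1 ++ [PySem.List.slice t (some st.2.1) none]

def escape_tilda (t : String) : String :=
  if t == "~" then "" else
    let seq := exactSplitA t.toList
    let r := seq.foldl
      (fun r s => if s == ([] : List Char) && r.getLast! == ([] : List Char)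
                  then r ++ [['~']] else r ++ [s])
      ["dummy".toList]
    String.ofList (r.drop 1).flatten

-- ===== PORT B =====
def altGo : Bool → List Char → List Char
  | _, [] => []
  | atStart, c :: rest =>
    if c = '~' then
      let run := 1 + (rest.takeWhile (· == '~')).length
      let rest' := rest.dropWhile (· == '~')
      let k := if atStart then (if rest' == [] then (run + 1) / 2 else run / 2) else run - 1
      List.replicate k '~' ++ altGo false rest'
    else c :: altGo false rest
termination_by _ cs => cs.length
decreasing_by
  · exact Nat.lt_succ_of_le (List.length_dropWhile_le _ _)
  · simp

def escape_tilda_alt (t : String) : String :=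
  if t == "~" then "" else String.ofList (altGo true t.toList)

-- ===== PRECONDITION & SPEC =====
def Spec_escape_tilda (t : String) (out : String) : Prop := out = escape_tilda_alt t
instance (t : String) (out : String) : Decidable (Spec_escape_tilda t out) := by unfold Spec_escape_tilda; infer_instance

-- ===== CLAIM (what is proved, stated in full; the proofs are below) =====
def Claim_equal_escape_tilda : Prop := ∀ (t : String), Dom_escape_tilda t → Spec_escape_tilda t (escape_tilda t)

-- ===== LEMMAS AND PROOFS =====

-- pure recursive form of _exact_split: current chunk, not_line_top, "previous char was '~'"
def refSplit (cur : List Char) (ntl pt : Bool) : List Char → List (List Char)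
  | [] => [cur]
  | c :: rest =>
    if c = '~' then cur :: (if ntl && pt then [[]] else []) ++ refSplit [] ntl true rest
    else refSplit (cur ++ [c]) true false rest

-- pure form of the lookback fold in escape_tilda: le = "last appended chunk is empty"
def gFold (le : Bool) : List (List Char) → List (List Char)
  | [] => []
  | s :: rest =>
    if s == ([] : List Char) && le then ['~'] :: gFold false rest
    else s :: gFold (s == ([] : List Char)) rest

theorem getLast!_concat (l : List (List Char)) (a : List Char) :
    (l ++ [a]).getLast! = a := by
  cases l with
  | nil => rfl
  | cons x xs => simp [List.getLast!]

theorem altGo_nil (b : Bool) : altGo b [] = [] := by rw [altGo]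

theorem altGo_cons_other (b : Bool) (c : Char) (cs : List Char) (h : c ≠ '~') :
    altGo b (c :: cs) = c :: altGo false cs := by rw [altGo]; simp [h]

theorem altGo_cons_tilde (b : Bool) (cs : List Char) :
    altGo b ('~' :: cs) =
      List.replicate
        (if b then
          (if cs.dropWhile (· == '~') == [] then (1 + (cs.takeWhile (· == '~')).length + 1) / 2
           else (1 + (cs.takeWhile (· == '~')).length) / 2)
         else (cs.takeWhile (· == '~')).length) '~'
      ++ altGo false (cs.dropWhile (· == '~')) := by
  rw [altGo]; cases b <;> simp

-- the fold over seq with nonempty accumulator r equals r ++ gFold (last of r empty) seq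
theorem foldl_eq_gFold (seq : List (List Char)) :
    ∀ (r : List (List Char)), r ≠ [] →
      seq.foldl
        (fun r s => if s == ([] : List Char) && r.getLast! == ([] : List Char)
                    then r ++ [['~']] else r ++ [s]) r
      = r ++ gFold (r.getLast! == []) seq := by
  induction seq with
  | nil => intro r _; simp [gFold]
  | cons s rest ih =>
    intro r hr
    rw [List.foldl_cons]
    by_cases hb : (s == ([] : List Char) && r.getLast! == ([] : List Char)) = true
    · rw [if_pos hb, ih _ (by simp), getLast!_concat]
      have h1 : gFold (r.getLast! == []) (s :: rest) = ['~'] :: gFold false rest := by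
        rw [gFold, if_pos hb]
      rw [h1]
      simp [gFold]
    · rw [if_neg hb, ih _ (by simp), getLast!_concat]
      have h1 : gFold (r.getLast! == []) (s :: rest)
          = s :: gFold (s == ([] : List Char)) rest := by
        rw [gFold, if_neg hb]
      rw [h1]
      simp

-- bridge: the enumerate/slice foldl pipeline equals refSplit
theorem splitFold_inv (t : List Char) :
    ∀ (S : List Char) (i pN : Nat) (ys : List (List Char)) (ntl : Bool) (pchar : List Char),
      S = t.drop i → pN ≤ i →
      (let st := (PySem.List.enumerate S ((i : Nat) : Int)).foldl (etSplitStep t)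
                   (ys, ((pN : Nat) : Int), ntl, pchar);
       st.1 ++ [PySem.List.slice t (some st.2.1) none])
      = ys ++ refSplit ((t.drop pN).take (i - pN)) ntl (pchar == ['~']) S := by
  intro S
  induction S with
  | nil =>
    intro i pN ys ntl pchar hS hp
    have hlen : t.length ≤ i := List.drop_eq_nil_iff.mp hS.symm
    have htake : (t.drop pN).take (i - pN) = t.drop pN := by
      apply List.take_of_length_le; simp; omega
    simp [PySem.List.enumerate, PySem.List.slice_from_natCast, refSplit, htake]
  | cons c S' ih =>
    intro i pN ys ntl pchar hS hp
    have hi : i < t.length := by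
      by_contra h
      rw [List.drop_eq_nil_iff.mpr (by omega)] at hS
      simp at hS
    have hdec : t.drop i = t[i] :: t.drop (i + 1) := List.drop_eq_getElem_cons hi
    rw [← hS] at hdec
    have hc : c = t[i] := (List.cons.injEq _ _ _ _ ▸ hdec).1
    have hS' : S' = t.drop (i + 1) := (List.cons.injEq _ _ _ _ ▸ hdec).2
    rw [PySem.List.enumerate_cons, List.foldl_cons]
    by_cases htl : c = '~'
    · have hstep : etSplitStep t (ys, ((pN : Nat) : Int), ntl, pchar) (((i : Nat) : Int), c)
          = ((if ntl && pchar == ['~']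
              then (ys ++ [PySem.List.slice t (some ((pN : Nat) : Int)) (some ((i : Nat) : Int))]) ++ [[]]
              else ys ++ [PySem.List.slice t (some ((pN : Nat) : Int)) (some ((i : Nat) : Int))]),
             ((i : Nat) : Int) + 1, ntl, [c]) := by
        simp [etSplitStep, htl]
      rw [hstep]
      have hcast : ((i : Nat) : Int) + 1 = (((i + 1 : Nat)) : Int) := by push_cast; ring
      rw [hcast]
      have := ih (i + 1) (i + 1)
        (if ntl && pchar == ['~']
         then (ys ++ [PySem.List.slice t (some ((pN : Nat) : Int)) (some ((i : Nat) : Int))]) ++ [[]]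
         else ys ++ [PySem.List.slice t (some ((pN : Nat) : Int)) (some ((i : Nat) : Int))])
        ntl [c] hS' (by omega)
      rw [this]
      have hsl : PySem.List.slice t (some ((pN : Nat) : Int)) (some ((i : Nat) : Int))
          = (t.drop pN).take (i - pN) := PySem.List.slice_natCast t pN i
      have hcur : (t.drop (i + 1)).take (i + 1 - (i + 1)) = [] := by simp
      rw [hsl, hcur]
      have hrs : refSplit ((t.drop pN).take (i - pN)) ntl (pchar == ['~']) (c :: S')
          = (t.drop pN).take (i - pN)
            :: (if ntl && (pchar == ['~']) then [[]] else []) ++ refSplit [] ntl true S' := by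
        rw [refSplit, if_pos htl]
      rw [hrs]
      have hpc : (([c] : List Char) == ['~']) = true := by simp [htl]
      rw [hpc]
      by_cases hx : (ntl && pchar == ['~']) = true <;> simp [hx]
    · have hstep : etSplitStep t (ys, ((pN : Nat) : Int), ntl, pchar) (((i : Nat) : Int), c)
          = (ys, ((pN : Nat) : Int), true, [c]) := by
        simp [etSplitStep, htl]
      rw [hstep]
      have hcast : ((i : Nat) : Int) + 1 = (((i + 1 : Nat)) : Int) := by push_cast; ring
      rw [hcast]
      have := ih (i + 1) pN ys true [c] hS' (by omega)
      rw [this]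
      have hpc : (([c] : List Char) == ['~']) = false := by simp [htl]
      rw [hpc]
      have hrs : refSplit ((t.drop pN).take (i - pN)) ntl (pchar == ['~']) (c :: S')
          = refSplit ((t.drop pN).take (i - pN) ++ [c]) true false S' := by
        rw [refSplit, if_neg htl]
      rw [hrs]
      have hext : (t.drop pN).take (i - pN) ++ [c] = (t.drop pN).take (i + 1 - pN) := by
        have h1 : i + 1 - pN = (i - pN) + 1 := by omega
        rw [h1, List.take_succ]
        have h2 : (t.drop pN)[i - pN]? = some t[i] := by
          rw [List.getElem?_drop]
          have : pN + (i - pN) = i := by omega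
          rw [this, List.getElem?_eq_getElem hi]
        rw [h2, hc]
        rfl
      rw [hext]

theorem exactSplitA_eq_refSplit (t : List Char) :
    exactSplitA t = refSplit [] false false t := by
  have := splitFold_inv t t 0 0 [] false [] (by simp) (by omega)
  simpa [exactSplitA] using this

-- NT ("a non-tilde char was seen, current chunk nonempty") and RUN ("inside a tilde run
-- after a non-tilde char") proved jointly by strong induction on the length
theorem nt_run : ∀ (n : Nat) (cs : List Char), cs.length ≤ n →
    ((∀ (cur : List Char) (le : Bool), cur ≠ [] →
        (gFold le (refSplit cur true false cs)).flatten = cur ++ altGo false cs)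
     ∧ (gFold false (refSplit [] true true cs)).flatten
         = List.replicate (cs.takeWhile (· == '~')).length '~'
           ++ altGo false (cs.dropWhile (· == '~'))) := by
  intro n
  induction n with
  | zero =>
    intro cs hcs
    have h0 : cs = [] := List.eq_nil_of_length_eq_zero (Nat.le_zero.mp hcs)
    subst h0
    constructor
    · intro cur le hcur
      simp [refSplit, gFold, altGo_nil, hcur]
    · simp [refSplit, gFold, altGo_nil]
  | succ n ih =>
    intro cs hcs
    match cs with
    | [] =>
      constructor
      · intro cur le hcur
        simp [refSplit, gFold, altGo_nil, hcur]
      · simp [refSplit, gFold, altGo_nil]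
    | c :: cs' =>
      have h' : cs'.length ≤ n := by simpa using Nat.succ_le_succ_iff.mp (by simpa using hcs)
      by_cases htl : c = '~'
      · subst htl
        constructor
        · intro cur le hcur
          have h1 : refSplit cur true false ('~' :: cs')
              = cur :: refSplit [] true true cs' := by
            rw [refSplit]; simp
          rw [h1]
          have h2 : gFold le (cur :: refSplit [] true true cs')
              = cur :: gFold false (refSplit [] true true cs') := by
            rw [gFold]
            have : (cur == ([] : List Char)) = false := by simpa using hcur
            simp [this]
          rw [h2, List.flatten_cons, (ih cs' h').2, altGo_cons_tilde]
          simp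
        · have h1 : refSplit [] true true ('~' :: cs')
              = [] :: [] :: refSplit [] true true cs' := by
            rw [refSplit]; simp
          rw [h1]
          have h2 : gFold false ([] :: [] :: refSplit [] true true cs')
              = [] :: ['~'] :: gFold false (refSplit [] true true cs') := by
            rw [gFold, if_neg (by simp), gFold, if_pos (by simp)]
          rw [h2]
          simp only [List.flatten_cons, (ih cs' h').2]
          simp [List.replicate_succ]
      · constructor
        · intro cur le hcur
          have h1 : refSplit cur true false (c :: cs')
              = refSplit (cur ++ [c]) true false cs' := by
            rw [refSplit, if_neg htl]
          rw [h1, ((ih cs' h').1 (cur ++ [c]) le (by simp)), altGo_cons_other _ _ _ htl]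
          simp
        · have h1 : refSplit [] true true (c :: cs')
              = refSplit [c] true false cs' := by
            rw [refSplit, if_neg htl]; rfl
          rw [h1, ((ih cs' h').1 [c] false (by simp))]
          have h2 : (c :: cs').takeWhile (· == '~') = [] := by simp [List.takeWhile_cons, htl]
          have h3 : (c :: cs').dropWhile (· == '~') = c :: cs' := by simp [List.dropWhile_cons, htl]
          rw [h2, h3, altGo_cons_other _ _ _ htl]
          simp

-- leading-run counter: empties alternate through the fold's lookback
def lcnt (le : Bool) (a : Nat) (e : Bool) : Nat :=
  match a with
  | 0 => if e && le then 1 else 0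
  | a + 1 => (if le then 1 else 0) + lcnt (!le) a e

theorem lcnt_true_succ (a : Nat) (e : Bool) :
    lcnt true (a + 1) e = lcnt false a e + 1 := by
  simp [lcnt]; omega

theorem lcnt_closed (a : Nat) (e : Bool) :
    lcnt true a e = (if e then (a + 2) / 2 else (a + 1) / 2)
    ∧ lcnt false a e = (if e then (a + 1) / 2 else a / 2) := by
  induction a with
  | zero => cases e <;> simp [lcnt]
  | succ a ih =>
    constructor
    · show 1 + lcnt false a e = _
      rw [ih.2]; cases e <;> simp <;> omega
    · show 0 + lcnt true a e = _
      rw [ih.1]; cases e <;> simp <;> omega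

-- leading tilde run (line top, previous char '~')
theorem gFold_refSplit_lead : ∀ (cs : List Char) (le : Bool),
    (gFold le (refSplit [] false true cs)).flatten
      = List.replicate
          (lcnt le (cs.takeWhile (· == '~')).length (cs.dropWhile (· == '~') == [])) '~'
        ++ altGo false (cs.dropWhile (· == '~')) := by
  intro cs
  induction cs with
  | nil => intro le; cases le <;> simp [refSplit, gFold, lcnt, altGo_nil]
  | cons c cs' ih =>
    intro le
    by_cases htl : c = '~'
    · subst htl
      have h1 : refSplit [] false true ('~' :: cs')
          = [] :: refSplit [] false true cs' := by
        rw [refSplit]; simp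
      rw [h1]
      have h2 : ('~' :: cs').takeWhile (· == '~') = '~' :: cs'.takeWhile (· == '~') := by
        simp [List.takeWhile]
      have h3 : ('~' :: cs').dropWhile (· == '~') = cs'.dropWhile (· == '~') := by
        simp [List.dropWhile]
      rw [h2, h3]
      cases le
      · have h4 : gFold false ([] :: refSplit [] false true cs')
            = [] :: gFold true (refSplit [] false true cs') := by
          rw [gFold, if_neg (by simp)]; rfl
        rw [h4, List.flatten_cons, ih true]
        simp [lcnt]
      · have h4 : gFold true ([] :: refSplit [] false true cs')
            = ['~'] :: gFold false (refSplit [] false true cs') := by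
          rw [gFold, if_pos (by simp)]
        rw [h4, List.flatten_cons, ih false, List.length_cons, lcnt_true_succ,
            List.replicate_succ]
        simp
    · have h1 : refSplit [] false true (c :: cs')
          = refSplit [c] true false cs' := by
        rw [refSplit, if_neg htl]; rfl
      rw [h1, ((nt_run cs'.length cs' le_rfl).1 [c] le (by simp))]
      have h2 : (c :: cs').takeWhile (· == '~') = [] := by simp [List.takeWhile_cons, htl]
      have h3 : (c :: cs').dropWhile (· == '~') = c :: cs' := by simp [List.dropWhile_cons, htl]
      rw [h2, h3, altGo_cons_other _ _ _ htl]
      cases le <;> simp [lcnt, htl]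

-- top level: A's split+fold pipeline equals B's single pass
theorem gFold_refSplit_top (t : List Char) :
    (gFold false (refSplit [] false false t)).flatten = altGo true t := by
  cases t with
  | nil => simp [refSplit, gFold, altGo_nil]
  | cons c cs =>
    by_cases htl : c = '~'
    · subst htl
      have h1 : refSplit [] false false ('~' :: cs)
          = [] :: refSplit [] false true cs := by
        rw [refSplit]; simp
      have h2 : gFold false ([] :: refSplit [] false true cs)
          = [] :: gFold true (refSplit [] false true cs) := by
        rw [gFold, if_neg (by simp)]; rfl
      rw [h1, h2, List.flatten_cons, gFold_refSplit_lead cs true,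
          (lcnt_closed _ _).1, altGo_cons_tilde]
      have ha : 1 + (cs.takeWhile (· == '~')).length + 1
          = (cs.takeWhile (· == '~')).length + 2 := by omega
      have hb : 1 + (cs.takeWhile (· == '~')).length
          = (cs.takeWhile (· == '~')).length + 1 := by omega
      rw [ha, hb, List.nil_append, if_pos rfl]
    · have h1 : refSplit [] false false (c :: cs)
          = refSplit [c] true false cs := by
        rw [refSplit, if_neg htl]; rfl
      rw [h1, ((nt_run cs.length cs le_rfl).1 [c] false (by simp)),
          altGo_cons_other _ _ _ htl]
      rfl

-- ===== VERDICT (by name: the statement is the Claim_ definition above) =====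
theorem escape_tilda_spec : Claim_equal_escape_tilda := by
  intro t _
  unfold Spec_escape_tilda escape_tilda escape_tilda_alt
  by_cases h : t == "~"
  · simp [h]
  · simp only [h, Bool.false_eq_true, if_false]
    rw [exactSplitA_eq_refSplit,
        foldl_eq_gFold _ ["dummy".toList] (by simp)]
    have : (["dummy".toList].getLast! == ([] : List Char)) = false := by decide
    rw [this]
    simp [gFold_refSplit_top]
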